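-- pv_equiv track=rewrite | github.com/vincenzorm117/CCI_6edition | CCI_6edition/chapter16/21_sum_swap/python/solution.py | sumSwapBrute
-- ===== SOURCE A (Python) =====
-- def sumSwapBrute(A,B):
--     sumA = 0
--     for a in A:
--         sumA += a
--     sumB = 0
--     for b in B:
--         sumB += b
--     for a in A:
--         for b in B:
--             if sumA - a + b == sumB - b + a:
--                 return (a,b)
-- ===== SOURCE B (Python) =====
-- def sumSwapBrute(A, B):
--     d = sum(A) - sum(B)
--     if d % 2 != 0:
--         return None
--     t = d // 2
--     bs = set(B)
--     for a in A:
--         if a - t in bs: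
--             return (a, a - t)
--     return None
-- ===== Notes on version B (the rewrite author's own statement) =====
-- stated objective: faster
-- what changed: Replaces the O(n*m) double loop with the closed-form target difference (sumA-sumB)/2, an O(1)-lookup hash set of B, and a single pass over A (parity short-circuit when no swap can exist).
import Mathlib
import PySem

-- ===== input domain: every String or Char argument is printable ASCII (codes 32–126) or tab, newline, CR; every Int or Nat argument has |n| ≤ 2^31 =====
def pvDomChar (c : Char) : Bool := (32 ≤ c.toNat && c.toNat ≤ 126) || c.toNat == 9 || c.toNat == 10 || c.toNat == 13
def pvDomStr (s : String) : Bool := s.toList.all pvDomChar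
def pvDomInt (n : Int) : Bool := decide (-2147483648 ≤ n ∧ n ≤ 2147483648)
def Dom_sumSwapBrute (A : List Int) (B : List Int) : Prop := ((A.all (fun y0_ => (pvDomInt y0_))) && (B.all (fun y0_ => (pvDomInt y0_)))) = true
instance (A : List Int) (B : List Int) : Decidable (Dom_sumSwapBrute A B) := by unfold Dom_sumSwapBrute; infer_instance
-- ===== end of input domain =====

-- B replaces A's O(n*m) double loop by the closed-form target difference, a set of B and one pass over A (proved equal; faster in a timing run).


-- ===== PORT A =====
-- inner 'for b in B' loop
def pvInner (sumA sumB a : Int) : List Int → Option (Int × Int)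
  | [] => none
  | b :: bs => if sumA - a + b = sumB - b + a then some (a, b) else pvInner sumA sumB a bs

-- outer 'for a in A' loop
def pvOuter (sumA sumB : Int) (B : List Int) : List Int → Option (Int × Int)
  | [] => none
  | a :: as =>
    match pvInner sumA sumB a B with
    | some p => some p
    | none => pvOuter sumA sumB B as

def sumSwapBrute (A : List Int) (B : List Int) : Option (Int × Int) :=
  let sumA := A.foldl (· + ·) 0
  let sumB := B.foldl (· + ·) 0
  pvOuter sumA sumB B A

-- ===== PORT B =====
-- single pass over A looking up a - t in the set of B
def pvScan (t : Int) (bs : PySem.Set Int) : List Int → Option (Int × Int)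
  | [] => none
  | a :: rest => if PySem.Set.contains bs (a - t) then some (a, a - t) else pvScan t bs rest

def sumSwapBrute_alt (A : List Int) (B : List Int) : Option (Int × Int) :=
  let d := A.sum - B.sum
  if PySem.Int.mod d 2 ≠ 0 then none
  else pvScan (PySem.Int.floordiv d 2) (PySem.Set.ofList B) A

-- ===== PRECONDITION & SPEC =====
def Spec_sumSwapBrute (A : List Int) (B : List Int) (out : Option (Int × Int)) : Prop := out = sumSwapBrute_alt A B
instance (A : List Int) (B : List Int) (out : Option (Int × Int)) : Decidable (Spec_sumSwapBrute A B out) := by unfold Spec_sumSwapBrute; infer_instance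

-- ===== CLAIM (what is proved, stated in full; the proofs are below) =====
def Claim_equal_sumSwapBrute : Prop := ∀ (A : List Int) (B : List Int), Dom_sumSwapBrute A B → Spec_sumSwapBrute A B (sumSwapBrute A B)

-- ===== LEMMAS AND PROOFS =====

theorem pvInner_odd (sumA sumB a : Int) (hodd : ¬ (2 ∣ sumA - sumB)) (B : List Int) :
    pvInner sumA sumB a B = none := by
  induction B with
  | nil => rfl
  | cons b bs ih =>
    simp only [pvInner]
    rw [if_neg, ih]
    intro h
    exact hodd ⟨a - b, by omega⟩

theorem pvInner_even (sumA sumB a t : Int) (ht : sumA - sumB = 2 * t) (B : List Int) :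
    pvInner sumA sumB a B = if (a - t) ∈ B then some (a, a - t) else none := by
  induction B with
  | nil => rfl
  | cons b bs ih =>
    simp only [pvInner, List.mem_cons]
    by_cases hb : b = a - t
    · subst hb
      rw [if_pos (by omega), if_pos (Or.inl rfl)]
    · rw [if_neg (by omega), ih]
      by_cases hm : (a - t) ∈ bs
      · rw [if_pos hm, if_pos (Or.inr hm)]
      · rw [if_neg hm, if_neg (by rintro (h | h); exacts [hb h.symm, hm h])]

theorem pvOuter_odd (sumA sumB : Int) (hodd : ¬ (2 ∣ sumA - sumB)) (B A : List Int) :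
    pvOuter sumA sumB B A = none := by
  induction A with
  | nil => rfl
  | cons a as ih => simp only [pvOuter, pvInner_odd sumA sumB a hodd B, ih]

theorem pvOuter_even (sumA sumB t : Int) (ht : sumA - sumB = 2 * t) (B A : List Int) :
    pvOuter sumA sumB B A = pvScan t (PySem.Set.ofList B) A := by
  induction A with
  | nil => rfl
  | cons a as ih =>
    simp only [pvOuter, pvScan, pvInner_even sumA sumB a t ht B]
    by_cases hm : (a - t) ∈ B
    · simp [hm]
    · simp [hm, ih]

-- ===== VERDICT (by name: the statement is the Claim_ definition above) =====
theorem sumSwapBrute_spec : Claim_equal_sumSwapBrute := by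
  intro A B _
  unfold Spec_sumSwapBrute sumSwapBrute sumSwapBrute_alt
  have hA : A.foldl (· + ·) 0 = A.sum := List.sum_eq_foldl.symm
  have hB : B.foldl (· + ·) 0 = B.sum := List.sum_eq_foldl.symm
  simp only [hA, hB]
  by_cases hodd : PySem.Int.mod (A.sum - B.sum) 2 = 0
  · rw [if_neg (by simpa using hodd)]
    have hdvd : 2 ∣ A.sum - B.sum := (PySem.Int.mod_eq_zero_iff_dvd _ _).mp hodd
    obtain ⟨t, ht⟩ := hdvd
    have hfd : PySem.Int.floordiv (A.sum - B.sum) 2 = t := by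
      rw [PySem.Int.floordiv_eq_ediv_of_pos (by norm_num), ht]
      omega
    rw [hfd]
    exact pvOuter_even _ _ t ht B A
  · rw [if_pos (by simpa using hodd)]
    have hndvd : ¬ (2 ∣ A.sum - B.sum) := fun h =>
      hodd ((PySem.Int.mod_eq_zero_iff_dvd _ _).mpr h)
    exact pvOuter_odd _ _ hndvd B A
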